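-- pv_equiv track=rewrite | github.com/frankxaio/IC-Contest | 2018_grad/Algo/exhaustive_proof.py | simulate_huffman_merge
-- ===== SOURCE A (Python) =====
-- def simulate_huffman_merge(frequencies):
--     """
--     Simulate Huffman merging process and return the merge sequence.
--     Returns True if two-by-two grouping occurs, False otherwise.
--     """
--     items = [(f, str(i)) for i, f in enumerate(frequencies)]
--     merge_sequence = []
--
--     for step in range(len(frequencies) - 1):
--         items.sort(key=lambda x: x[0])  # Sort by frequency
--         f1, i1 = items.pop(0)
--         f2, i2 = items.pop(0)
--         combined_freq = f1 + f2
--         combined_symbols = f"[{i1},{i2}]"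
--         items.append((combined_freq, combined_symbols))
--         merge_sequence.append((f1, i1, f2, i2, combined_freq))
--
--     return merge_sequence
-- ===== SOURCE B (Python) =====
-- def simulate_huffman_merge(frequencies):
--     """
--     Two-queue Huffman merge: sort the leaves once, then repeatedly take the two
--     smallest items by comparing the fronts of the sorted leaf queue and the FIFO
--     queue of merged nodes (which is produced in non-decreasing order); on a tie
--     the leaf queue wins, which reproduces the stable-sort order.
--     """
--     leaves = sorted([(f, str(i)) for i, f in enumerate(frequencies)],
--                     key=lambda x: x[0])
--     merged = []
--     i = j = 0
--     out = []
--     for _ in range(len(frequencies) - 1):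
--         picks = []
--         for _ in range(2):
--             if j >= len(merged) or (i < len(leaves) and leaves[i][0] <= merged[j][0]):
--                 picks.append(leaves[i])
--                 i += 1
--             else:
--                 picks.append(merged[j])
--                 j += 1
--         (f1, s1), (f2, s2) = picks
--         c = f1 + f2
--         merged.append((c, "[" + s1 + "," + s2 + "]"))
--         out.append((f1, s1, f2, s2, c))
--     return out
-- ===== Notes on version B (the rewrite author's own statement) =====
-- stated objective: faster
-- what changed: B replaces A's full stable re-sort of the worklist at every merge step by the classic two-queue Huffman algorithm: sort the leaves once, then pick minima by comparing the fronts of the sorted leaf queue and the FIFO queue of merged nodes (ties prefer leaves, reproducing stable-sort order).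
import Mathlib
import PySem

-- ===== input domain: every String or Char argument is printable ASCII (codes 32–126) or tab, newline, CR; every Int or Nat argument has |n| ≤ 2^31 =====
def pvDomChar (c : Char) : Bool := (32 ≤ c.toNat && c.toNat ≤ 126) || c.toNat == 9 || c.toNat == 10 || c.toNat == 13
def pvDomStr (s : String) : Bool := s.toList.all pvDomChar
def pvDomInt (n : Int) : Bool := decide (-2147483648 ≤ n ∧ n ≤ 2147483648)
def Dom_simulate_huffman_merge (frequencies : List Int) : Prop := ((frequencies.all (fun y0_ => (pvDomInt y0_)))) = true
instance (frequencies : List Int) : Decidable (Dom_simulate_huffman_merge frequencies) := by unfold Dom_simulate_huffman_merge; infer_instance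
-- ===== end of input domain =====

-- B replaces A's per-step stable re-sort by the two-queue Huffman algorithm
-- (sort leaves once, FIFO queue of merged nodes): same merge sequence, fewer sorts.

-- ===== PORT A =====
-- A's loop: for step in range(len(frequencies)-1): sort by frequency (stable),
-- pop the two smallest, append the merged node at the end.
def pvALoop : List (Int × String) → Nat → List (Int × String × Int × String × Int)
  | _, 0 => []
  | items, k + 1 =>
    match PySem.List.sorted items (fun x => x.1) with
    | (f1, i1) :: (f2, i2) :: rest =>
      (f1, i1, f2, i2, f1 + f2) ::
        pvALoop (rest ++ [(f1 + f2, "[" ++ i1 ++ "," ++ i2 ++ "]")]) k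
    | _ => []  -- items.pop(0) on fewer than two items: unreachable from the entry point

def simulate_huffman_merge (frequencies : List Int) : List (Int × String × Int × String × Int) :=
  pvALoop ((PySem.List.enumerate frequencies).map (fun p => (p.2, PySem.Int.toStr p.1)))
    (frequencies.length - 1)

-- ===== PORT B =====
-- Source B's pop_min branch: take from the leaf queue when the merged queue is exhausted
-- or the leaf front is ≤ the merged front (ties prefer leaves), else from the merged
-- queue; Source B's index pointers i, j into the immutable lists are the dropped prefixes.
def pvPop : List (Int × String) → List (Int × String) →
    Option ((Int × String) × List (Int × String) × List (Int × String))
  | [], [] => none  -- Source B would index past both lists: unreachable from the entry point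
  | [], m :: q2 => some (m, [], q2)
  | l :: q1, [] => some (l, q1, [])
  | l :: q1, m :: q2 =>
    if l.1 ≤ m.1 then some (l, q1, m :: q2) else some (m, l :: q1, q2)

-- Source B's main loop: two pop_min calls, then push the merged node at the back of `merged`.
def pvBLoop : List (Int × String) → List (Int × String) → Nat →
    List (Int × String × Int × String × Int)
  | _, _, 0 => []
  | q1, q2, k + 1 =>
    match pvPop q1 q2 with
    | some ((f1, s1), q1', q2') =>
      match pvPop q1' q2' with
      | some ((f2, s2), q1'', q2'') =>
        (f1, s1, f2, s2, f1 + f2) ::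
          pvBLoop q1'' (q2'' ++ [(f1 + f2, "[" ++ s1 ++ "," ++ s2 ++ "]")]) k
      | none => []
    | none => []

def simulate_huffman_merge_alt (frequencies : List Int) : List (Int × String × Int × String × Int) :=
  pvBLoop
    (PySem.List.sorted
      ((PySem.List.enumerate frequencies).map (fun p => (p.2, PySem.Int.toStr p.1)))
      (fun x => x.1))
    [] (frequencies.length - 1)

-- ===== PRECONDITION & SPEC =====
def Spec_simulate_huffman_merge (frequencies : List Int) (out : List (Int × String × Int × String × Int)) : Prop := out = simulate_huffman_merge_alt frequencies
instance (frequencies : List Int) (out : List (Int × String × Int × String × Int)) : Decidable (Spec_simulate_huffman_merge frequencies out) := by unfold Spec_simulate_huffman_merge; infer_instance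

-- ===== CLAIM (what is proved, stated in full; the proofs are below) =====
def Claim_equal_simulate_huffman_merge : Prop := ∀ (frequencies : List Int), Dom_simulate_huffman_merge frequencies → Spec_simulate_huffman_merge frequencies (simulate_huffman_merge frequencies)

-- ===== LEMMAS AND PROOFS =====

-- Proof-side intermediate: A's loop with the pool kept sorted (stable insertion of
-- the merged node instead of a full re-sort).
def pvSLoop : List (Int × String) → Nat → List (Int × String × Int × String × Int)
  | (f1, i1) :: (f2, i2) :: rest, k + 1 =>
    (f1, i1, f2, i2, f1 + f2) ::
      pvSLoop (PySem.List.insertBy (fun a b => decide (a.1 < b.1))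
        (f1 + f2, "[" ++ i1 ++ "," ++ i2 ++ "]") rest) k
  | _, _ => []

-- Stable sort of (an already sorted list ++ [m]) is the stable insertion of m.
lemma pv_sorted_append_singleton (xs : List (Int × String)) (m : Int × String)
    (h : xs.Pairwise (fun a b => a.1 ≤ b.1)) :
    PySem.List.sorted (xs ++ [m]) (fun x => x.1) =
      PySem.List.insertBy (fun a b => decide (a.1 < b.1)) m xs := by
  rw [PySem.List.sorted_eq_foldl_insertBy, List.foldl_append]
  rw [← PySem.List.sorted_eq_foldl_insertBy,
    PySem.List.sorted_eq_self_of_pairwise xs (fun x => x.1) h]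
  rfl

-- A's loop on any (k+1)-element worklist equals the sorted-pool loop.
lemma pv_loop_eq : ∀ (k : Nat) (items : List (Int × String)), items.length = k + 1 →
    pvALoop items k = pvSLoop (PySem.List.sorted items (fun x => x.1)) k := by
  intro k
  induction k with
  | zero =>
    intro items _
    cases h : PySem.List.sorted items (fun x => x.1) <;> simp [pvALoop, pvSLoop]
  | succ k ih =>
    intro items hlen
    have hslen : (PySem.List.sorted items (fun x => x.1)).length = k + 2 := by
      rw [PySem.List.length_sorted, hlen]
    have hpw := PySem.List.sorted_pairwise items (fun x => x.1)
    cases hs : PySem.List.sorted items (fun x => x.1) with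
    | nil => rw [hs] at hslen; simp at hslen
    | cons p s1 =>
      cases p with
      | mk f1 i1 =>
        cases s1 with
        | nil => rw [hs] at hslen; simp at hslen
        | cons q rest =>
          cases q with
          | mk f2 i2 =>
            rw [hs] at hslen hpw
            have hrest : rest.Pairwise (fun a b : Int × String => a.1 ≤ b.1) :=
              (hpw.tail).tail
            have hrlen : (rest ++ [((f1 + f2 : Int), "[" ++ i1 ++ "," ++ i2 ++ "]")]).length = k + 1 := by
              simp at hslen ⊢; omega
            show pvALoop items (k + 1) = _
            rw [pvALoop]
            rw [hs]
            dsimp only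
            rw [ih _ hrlen]
            rw [pv_sorted_append_singleton _ _ hrest]
            rfl

-- Proof-side: the stable merge of the two queues, leaf queue winning ties = B's pool.
def pvMergeQ : List (Int × String) → List (Int × String) → List (Int × String)
  | [], q2 => q2
  | q1, [] => q1
  | l :: q1, m :: q2 =>
    if l.1 ≤ m.1 then l :: pvMergeQ q1 (m :: q2) else m :: pvMergeQ (l :: q1) q2

lemma pv_mergeQ_nil_left (q2 : List (Int × String)) : pvMergeQ [] q2 = q2 := by
  simp [pvMergeQ]

lemma pv_mergeQ_nil_right (q1 : List (Int × String)) : pvMergeQ q1 [] = q1 := by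
  cases q1 <;> simp [pvMergeQ]

lemma pv_mergeQ_cons (l m : Int × String) (q1 q2 : List (Int × String)) :
    pvMergeQ (l :: q1) (m :: q2) =
      if l.1 ≤ m.1 then l :: pvMergeQ q1 (m :: q2) else m :: pvMergeQ (l :: q1) q2 := by
  simp [pvMergeQ]

lemma pv_insertBy_cons (c x : Int × String) (xs : List (Int × String)) :
    PySem.List.insertBy (fun a b => decide (a.1 < b.1)) c (x :: xs) =
      if c.1 < x.1 then c :: x :: xs
      else x :: PySem.List.insertBy (fun a b => decide (a.1 < b.1)) c xs := by
  rw [PySem.List.insertBy]; split_ifs with h h2 <;> simp_all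

-- Inserting an element that dominates the whole (merged-queue) list appends it.
lemma pv_insertBy_append (c : Int × String) (q2 : List (Int × String))
    (hc : ∀ m ∈ q2, m.1 ≤ c.1) :
    PySem.List.insertBy (fun a b => decide (a.1 < b.1)) c q2 = q2 ++ [c] := by
  induction q2 with
  | nil => rfl
  | cons m q2 ih =>
    rw [pv_insertBy_cons, if_neg (by have := hc m (by simp); omega)]
    rw [ih (fun x hx => hc x (by simp [hx]))]
    rfl

-- Merging a queue with the single new node is a stable insertion.
lemma pv_mergeQ_single (c : Int × String) (q1 : List (Int × String)) :
    pvMergeQ q1 [c] = PySem.List.insertBy (fun a b => decide (a.1 < b.1)) c q1 := by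
  induction q1 with
  | nil => rw [pv_mergeQ_nil_left]; rfl
  | cons l q1 ih =>
    rw [pv_mergeQ_cons, pv_insertBy_cons]
    by_cases h : l.1 ≤ c.1
    · rw [if_pos h, if_neg (by omega), ih]
    · rw [if_neg h, if_pos (by omega), pv_mergeQ_nil_right]

-- Pushing the merged node at the back of the merged queue is a stable insertion into
-- the pool, provided every element still in the merged queue is ≤ the new node.
lemma pv_mergeQ_append (q1 q2 : List (Int × String)) (c : Int × String)
    (hc : ∀ m ∈ q2, m.1 ≤ c.1) :
    pvMergeQ q1 (q2 ++ [c]) =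
      PySem.List.insertBy (fun a b => decide (a.1 < b.1)) c (pvMergeQ q1 q2) := by
  induction q1, q2 using pvMergeQ.induct with
  | case1 q2 =>
    rw [pv_mergeQ_nil_left, pv_mergeQ_nil_left, pv_insertBy_append c q2 hc]
  | case2 q1 h =>
    rw [List.nil_append, pv_mergeQ_single, pv_mergeQ_nil_right]
  | case3 l q1 m q2 hle ih =>
    have hm : m.1 ≤ c.1 := hc m (by simp)
    rw [List.cons_append, pv_mergeQ_cons, if_pos hle, pv_mergeQ_cons, if_pos hle]
    rw [← List.cons_append, ih hc, pv_insertBy_cons, if_neg (by omega)]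
  | case4 l q1 m q2 hle ih =>
    have hm : m.1 ≤ c.1 := hc m (by simp)
    rw [List.cons_append, pv_mergeQ_cons, if_neg hle, pv_mergeQ_cons, if_neg hle]
    rw [ih (fun x hx => hc x (by simp [hx])), pv_insertBy_cons, if_neg (by omega)]

-- pvPop returns exactly the head of the merged pool, and the new queues merge to its tail.
lemma pv_pop_merge (q1 q2 : List (Int × String)) :
    (pvPop q1 q2 = none ∧ pvMergeQ q1 q2 = []) ∨
    ∃ r a b, pvPop q1 q2 = some (r, a, b) ∧ pvMergeQ q1 q2 = r :: pvMergeQ a b := by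
  match q1, q2 with
  | [], [] => left; exact ⟨rfl, pv_mergeQ_nil_left []⟩
  | [], m :: q2 => right; exact ⟨m, [], q2, rfl, by rw [pv_mergeQ_nil_left, pv_mergeQ_nil_left]⟩
  | l :: q1, [] => right; exact ⟨l, q1, [], rfl, by rw [pv_mergeQ_nil_right, pv_mergeQ_nil_right]⟩
  | l :: q1, m :: q2 =>
    right
    by_cases h : l.1 ≤ m.1
    · exact ⟨l, q1, m :: q2, by simp [pvPop, h], by rw [pv_mergeQ_cons, if_pos h]⟩
    · exact ⟨m, l :: q1, q2, by simp [pvPop, h], by rw [pv_mergeQ_cons, if_neg h]⟩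

-- Membership in the merged pool.
lemma pv_mem_mergeQ : ∀ (q1 q2 : List (Int × String)) (x : Int × String),
    x ∈ pvMergeQ q1 q2 ↔ x ∈ q1 ∨ x ∈ q2 := by
  intro q1 q2
  induction q1, q2 using pvMergeQ.induct with
  | case1 q2 => intro x; rw [pv_mergeQ_nil_left]; simp
  | case2 q1 h => intro x; rw [pv_mergeQ_nil_right]; simp
  | case3 l q1 m q2 hle ih =>
    intro x; rw [pv_mergeQ_cons, if_pos hle]; simp only [List.mem_cons, ih]; tauto
  | case4 l q1 m q2 hle ih =>
    intro x; rw [pv_mergeQ_cons, if_neg hle]; simp only [List.mem_cons, ih]; tauto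

-- pvPop takes the head of one queue and leaves the other untouched.
lemma pv_pop_cases {q1 q2 a b : List (Int × String)} {r : Int × String}
    (h : pvPop q1 q2 = some (r, a, b)) :
    (b = q2 ∧ q1 = r :: a) ∨ (a = q1 ∧ q2 = r :: b) := by
  match q1, q2 with
  | [], [] => simp [pvPop] at h
  | [], m :: q2 =>
    simp only [pvPop, Option.some.injEq, Prod.mk.injEq] at h
    obtain ⟨h1, h2, h3⟩ := h
    right; rw [h1, h2, h3]; exact ⟨rfl, rfl⟩
  | l :: q1, [] =>
    simp only [pvPop, Option.some.injEq, Prod.mk.injEq] at h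
    obtain ⟨h1, h2, h3⟩ := h
    left; rw [h1, h2, h3]; exact ⟨rfl, rfl⟩
  | l :: q1, m :: q2 =>
    simp only [pvPop] at h
    split_ifs at h with hle <;>
      simp only [Option.some.injEq, Prod.mk.injEq] at h <;>
      obtain ⟨h1, h2, h3⟩ := h
    · left; rw [h1, h2, h3]; exact ⟨rfl, rfl⟩
    · right; rw [h1, h2, h3]; exact ⟨rfl, rfl⟩

-- The main invariant: the sorted-pool loop equals B's two-queue loop whenever the pool
-- is the stable queue merge, the pool is sorted, and every merged-queue element that
-- survives the next two pops is ≤ their sum (the queue discipline's working invariant).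
lemma pv_main : ∀ (k : Nat) (q1 q2 : List (Int × String)),
    (pvMergeQ q1 q2).Pairwise (fun a b => a.1 ≤ b.1) →
    (∀ r1 s1 s2 r2 u1 u2, pvPop q1 q2 = some (r1, s1, s2) →
      pvPop s1 s2 = some (r2, u1, u2) → ∀ m ∈ u2, m.1 ≤ r1.1 + r2.1) →
    pvSLoop (pvMergeQ q1 q2) k = pvBLoop q1 q2 k := by
  intro k
  induction k with
  | zero =>
    intro q1 q2 _ _
    cases h : pvMergeQ q1 q2 with
    | nil => simp [pvSLoop, pvBLoop]
    | cons x t => cases t <;> simp [pvSLoop, pvBLoop]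
  | succ k ih =>
    intro q1 q2 hsorted hH
    rcases pv_pop_merge q1 q2 with ⟨hp, hm⟩ | ⟨r1, s1, s2, hp1, hm1⟩
    · rw [hm]
      simp only [pvBLoop, hp]
      simp [pvSLoop]
    · rcases pv_pop_merge s1 s2 with ⟨hp, hm⟩ | ⟨r2, s1', s2', hp2, hm2⟩
      · obtain ⟨f, s⟩ := r1
        rw [hm1, hm]
        simp only [pvBLoop, hp1, hp]
        simp [pvSLoop]
      · -- pool = r1 :: r2 :: t with t = pvMergeQ s1' s2'
        obtain ⟨f1, i1⟩ := r1
        obtain ⟨f2, i2⟩ := r2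
        set c : Int × String := (f1 + f2, "[" ++ i1 ++ "," ++ i2 ++ "]") with hc
        have hmm : ∀ m ∈ s2', m.1 ≤ f1 + f2 := fun m hm => hH _ _ _ _ _ _ hp1 hp2 m hm
        rw [hm1, hm2]
        rw [hm1, hm2] at hsorted
        have ht : (pvMergeQ s1' s2').Pairwise (fun a b : Int × String => a.1 ≤ b.1) :=
          hsorted.tail.tail
        have hf12 : f1 ≤ f2 :=
          (List.pairwise_cons.mp hsorted).1 (f2, i2) (by simp)
        have hyt : ∀ z ∈ pvMergeQ s1' s2', f2 ≤ z.1 :=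
          fun z hz => (List.pairwise_cons.mp (List.pairwise_cons.mp hsorted).2).1 z hz
        simp only [pvSLoop, pvBLoop, hp1, hp2]
        -- both sides recurse; identify the new pools
        have hins : pvMergeQ s1' (s2' ++ [c]) =
            PySem.List.insertBy (fun a b => decide (a.1 < b.1)) c (pvMergeQ s1' s2') :=
          pv_mergeQ_append _ _ _ hmm
        have hins' : PySem.List.insertBy (fun a b => decide (a.1 < b.1)) c (pvMergeQ s1' s2') =
            PySem.List.sorted (pvMergeQ s1' s2' ++ [c]) (fun x => x.1) :=
          (pv_sorted_append_singleton _ _ ht).symm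
        have hsorted' : (pvMergeQ s1' (s2' ++ [c])).Pairwise
            (fun a b : Int × String => a.1 ≤ b.1) := by
          rw [hins, hins']
          exact PySem.List.sorted_pairwise _ _
        have hH' : ∀ r1' t1 t2 r2' u1 u2, pvPop s1' (s2' ++ [c]) = some (r1', t1, t2) →
            pvPop t1 t2 = some (r2', u1, u2) → ∀ m ∈ u2, m.1 ≤ r1'.1 + r2'.1 := by
          intro r1' t1 t2 r2' u1 u2 h1 h2 m hmem
          -- every element still in the merged queue is in s2' or is c, hence ≤ f1 + f2,
          -- and both popped elements (when the queue survives) lie in the old pool tail,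
          -- hence are ≥ f2; so m ≤ f1 + f2 ≤ f2 + f2 ≤ r1' + r2'.
          have hmc : ∀ x : Int × String, x ∈ s2' ∨ x = c → x.1 ≤ f1 + f2 := by
            rintro x (hx | rfl)
            · exact hmm x hx
            · simp [hc]
          rcases pv_pop_cases h1 with ⟨hb1, ha1⟩ | ⟨ha1, hb1⟩
          · -- first pop from the leaf queue: r1' ∈ s1'
            have hr1 : r1' ∈ pvMergeQ s1' s2' := by
              rw [pv_mem_mergeQ]; left; rw [ha1]; simp
            rcases pv_pop_cases h2 with ⟨hb2, ha2⟩ | ⟨ha2, hb2⟩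
            · -- second pop also from the leaf queue
              have hr2 : r2' ∈ pvMergeQ s1' s2' := by
                rw [pv_mem_mergeQ]; left; rw [ha1, ha2]; simp
              have hmem' : m ∈ s2' ∨ m = c := by
                have : m ∈ s2' ++ [c] := by rw [← hb1, ← hb2]; exact hmem
                simpa using this
              have h0 := hmc m hmem'
              have h1' := hyt _ hr1
              have h2' := hyt _ hr2
              omega
            · -- second pop from the merged queue
              rw [hb1] at hb2
              cases s2' with
              | nil =>
                simp only [List.nil_append, List.cons.injEq] at hb2
                rw [← hb2.2] at hmem; simp at hmem
              | cons m0 s2t =>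
                simp only [List.cons_append, List.cons.injEq] at hb2
                have hr2 : r2' ∈ pvMergeQ s1' (m0 :: s2t) := by
                  rw [pv_mem_mergeQ]; right; rw [← hb2.1]; simp
                have hmem' : m ∈ s2t ∨ m = c := by
                  have : m ∈ s2t ++ [c] := by rw [hb2.2]; exact hmem
                  simpa using this
                have h0 := hmc m (by
                  rcases hmem' with h | h
                  exacts [Or.inl (List.mem_cons_of_mem _ h), Or.inr h])
                have h1' := hyt _ hr1
                have h2' := hyt _ hr2
                omega
          · -- first pop from the merged queue
            cases s2' with
            | nil =>
              -- it popped c itself; the merged queue is empty afterwards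
              simp only [List.nil_append, List.cons.injEq] at hb1
              rcases pv_pop_cases h2 with ⟨hb2, _⟩ | ⟨_, hb2⟩
              · rw [hb2, ← hb1.2] at hmem; simp at hmem
              · rw [← hb1.2] at hb2; simp at hb2
            | cons m0 s2t =>
              simp only [List.cons_append, List.cons.injEq] at hb1
              have hr1 : r1' ∈ pvMergeQ s1' (m0 :: s2t) := by
                rw [pv_mem_mergeQ]; right; rw [← hb1.1]; simp
              rcases pv_pop_cases h2 with ⟨hb2, ha2⟩ | ⟨ha2, hb2⟩
              · -- second pop from the leaf queue
                have hr2 : r2' ∈ pvMergeQ s1' (m0 :: s2t) := by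
                  rw [pv_mem_mergeQ]; left; rw [← ha1, ha2]; simp
                have hmem' : m ∈ s2t ∨ m = c := by
                  have : m ∈ s2t ++ [c] := by rw [hb1.2, ← hb2]; exact hmem
                  simpa using this
                have h0 := hmc m (by
                  rcases hmem' with h | h
                  exacts [Or.inl (List.mem_cons_of_mem _ h), Or.inr h])
                have h1' := hyt _ hr1
                have h2' := hyt _ hr2
                omega
              · -- second pop also from the merged queue
                rw [← hb1.2] at hb2
                cases s2t with
                | nil =>
                  simp only [List.nil_append, List.cons.injEq] at hb2
                  rw [← hb2.2] at hmem; simp at hmem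
                | cons m1 s2tt =>
                  simp only [List.cons_append, List.cons.injEq] at hb2
                  have hr2 : r2' ∈ pvMergeQ s1' (m0 :: m1 :: s2tt) := by
                    rw [pv_mem_mergeQ]; right; rw [← hb2.1]; simp
                  have hmem' : m ∈ s2tt ∨ m = c := by
                    have : m ∈ s2tt ++ [c] := by rw [hb2.2]; exact hmem
                    simpa using this
                  have h0 := hmc m (by
                    rcases hmem' with h | h
                    exacts [Or.inl (List.mem_cons_of_mem _ (List.mem_cons_of_mem _ h)),
                      Or.inr h])
                  have h1' := hyt _ hr1
                  have h2' := hyt _ hr2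
                  omega
        have hrec := ih s1' (s2' ++ [c]) hsorted' hH'
        rw [hins] at hrec
        rw [hrec]

-- ===== VERDICT (by name: the statement is the Claim_ definition above) =====
theorem simulate_huffman_merge_spec : Claim_equal_simulate_huffman_merge := by
  intro frequencies _
  unfold Spec_simulate_huffman_merge simulate_huffman_merge simulate_huffman_merge_alt
  cases hf : frequencies with
  | nil => rfl
  | cons a as =>
    rw [pv_loop_eq ((a :: as).length - 1) _ (by simp [PySem.List.enumerate])]
    have hq2 : ∀ r1 s1 s2 r2 u1 u2,
        pvPop (PySem.List.sorted ((PySem.List.enumerate (a :: as)).map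
          (fun p => (p.2, PySem.Int.toStr p.1))) (fun x => x.1)) [] = some (r1, s1, s2) →
        pvPop s1 s2 = some (r2, u1, u2) → ∀ m ∈ u2, m.1 ≤ r1.1 + r2.1 := by
      intro r1 s1 s2 r2 u1 u2 h1 h2 m hm
      rcases pv_pop_cases h1 with ⟨hb1, _⟩ | ⟨_, hb1⟩
      · rcases pv_pop_cases h2 with ⟨hb2, _⟩ | ⟨_, hb2⟩
        · rw [hb2, hb1] at hm; simp at hm
        · rw [hb1] at hb2; simp at hb2
      · simp at hb1
    have hpool := pv_mergeQ_nil_right (PySem.List.sorted ((PySem.List.enumerate (a :: as)).map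
      (fun p => (p.2, PySem.Int.toStr p.1))) (fun x => x.1))
    rw [← pv_main _ _ _ (by rw [hpool]; exact PySem.List.sorted_pairwise _ _) hq2, hpool]
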